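-- pv_equiv track=rewrite | github.com/tobeannouncd/AdventOfCode | 2019/day1.py | solve
-- ===== SOURCE A (Python) =====
-- from typing import Iterable
--
-- def fuel_required(mass: int) -> int:
--     return mass//3 - 2
--
-- def solve(inp) -> Iterable:
--     masses = list(map(int, inp.splitlines()))
--     yield sum(fuel_required(m) for m in masses)
--     new_fuel = 0
--     for mass in masses:
--         fuel = [fuel_required(mass)]
--         fuel2 = fuel_required(fuel[-1])
--         while fuel2 > 0:
--             fuel.append(fuel2)
--             fuel2 = fuel_required(fuel[-1])
--         new_fuel += sum(fuel)
--     yield new_fuel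
-- ===== SOURCE B (Python) =====
-- def solve(inp):
--     def fuel(m):
--         return m // 3 - 2
--
--     def total(f):
--         # f plus all further fuel-for-fuel, as long as the next amount is positive
--         n = fuel(f)
--         return f + total(n) if n > 0 else f
--
--     masses = [int(line) for line in inp.splitlines()]
--     yield sum(map(fuel, masses))
--     yield sum(total(fuel(m)) for m in masses)
-- ===== Notes on version B (the rewrite author's own statement) =====
-- stated objective: simpler
-- what changed: Part 2 replaces the per-mass list-building while-loop (append then sum at the end) with a recursive chain-total helper summed in one comprehension; no intermediate lists. Pre_ only excludes inputs with a line that is not a Python int literal, where A raises ValueError.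
import Mathlib
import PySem

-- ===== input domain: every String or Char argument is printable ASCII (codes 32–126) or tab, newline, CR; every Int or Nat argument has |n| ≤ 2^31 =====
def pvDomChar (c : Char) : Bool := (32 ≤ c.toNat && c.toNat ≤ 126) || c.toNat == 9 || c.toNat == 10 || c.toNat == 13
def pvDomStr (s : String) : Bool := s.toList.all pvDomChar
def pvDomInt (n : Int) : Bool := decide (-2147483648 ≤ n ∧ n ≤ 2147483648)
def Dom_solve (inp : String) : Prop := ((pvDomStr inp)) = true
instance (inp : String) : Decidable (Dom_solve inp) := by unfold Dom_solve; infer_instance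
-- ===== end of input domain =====

-- B replaces Part 2's per-mass list-building while-loop by a recursive chain-total helper (simpler, no intermediate lists);
-- Pre_ excludes inputs where a line is not a Python int literal (A raises ValueError there).


-- ===== PORT A =====
def fuelRequired (m : Int) : Int := PySem.Int.floordiv m 3 - 2

theorem fuelRequired_lt (f : Int) (h : 0 < f) : fuelRequired f < f := by
  unfold fuelRequired
  rw [PySem.Int.floordiv_eq_ediv_of_pos (by norm_num)]
  omega

theorem fuelRequired_pos_bound (f : Int) (h : 0 < fuelRequired f) : 0 < f := by
  unfold fuelRequired at h
  rw [PySem.Int.floordiv_eq_ediv_of_pos (by norm_num)] at h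
  omega

-- A's while loop: keep appending fuel2 while it is positive
def buildFuel (fuel : List Int) (fuel2 : Int) : List Int :=
  if h : fuel2 > 0 then buildFuel (fuel ++ [fuel2]) (fuelRequired fuel2) else fuel
termination_by fuel2.toNat
decreasing_by have := fuelRequired_lt fuel2 h; omega

def solve (inp : String) : List Int :=
  -- Python raises ValueError on unparsable lines; Pre_solve excludes those, so getD 0 is never taken inside Pre_
  let masses : List Int := (PySem.Str.splitlines inp).map (fun l => (PySem.Int.ofStr? l).getD 0)
  let part1 : Int := (masses.map fuelRequired).sum
  let newFuel : Int := masses.foldl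
    (fun acc mass =>
      let fuel : List Int := [fuelRequired mass]
      let fuelList := buildFuel fuel (fuelRequired (fuelRequired mass))
      acc + fuelList.sum) 0
  [part1, newFuel]

-- ===== PORT B =====
-- f plus all further fuel-for-fuel, as long as the next amount is positive
def totalFuel (f : Int) : Int :=
  if h : fuelRequired f > 0 then f + totalFuel (fuelRequired f) else f
termination_by f.toNat
decreasing_by
  have h1 := fuelRequired_pos_bound f h
  have h2 := fuelRequired_lt f h1
  omega

def solve_alt (inp : String) : List Int :=
  let masses : List Int := (PySem.Str.splitlines inp).map (fun l => (PySem.Int.ofStr? l).getD 0)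
  [ (masses.map fuelRequired).sum,
    (masses.map (fun m => totalFuel (fuelRequired m))).sum ]

-- ===== PRECONDITION & SPEC =====
-- Pre_ excludes inputs where some line does not parse as a Python int (ValueError in A)
def Pre_solve (inp : String) : Prop :=
  ((PySem.Str.splitlines inp).all (fun l => (PySem.Int.ofStr? l).isSome)) = true
instance (inp : String) : Decidable (Pre_solve inp) := by unfold Pre_solve; infer_instance
def pvWitness_solve : String := "12\n14\n1969"

def Spec_solve (inp : String) (out : List Int) : Prop := out = solve_alt inp
instance (inp : String) (out : List Int) : Decidable (Spec_solve inp out) := by unfold Spec_solve; infer_instance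

-- ===== CLAIM (what is proved, stated in full; the proofs are below) =====
def Claim_equal_solve : Prop := ∀ (inp : String), Dom_solve inp → Pre_solve inp → Spec_solve inp (solve inp)

-- ===== LEMMAS AND PROOFS =====

-- sum of the tail of the chain, counted only while positive (proof-only helper)
def restFuel (f : Int) : Int :=
  if h : f > 0 then f + restFuel (fuelRequired f) else 0
termination_by f.toNat
decreasing_by have := fuelRequired_lt f h; omega

theorem sum_buildFuel (fuel : List Int) (f2 : Int) :
    (buildFuel fuel f2).sum = fuel.sum + restFuel f2 := by
  induction fuel, f2 using buildFuel.induct with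
  | case1 fuel f2 h ih =>
      rw [buildFuel, restFuel]
      simp only [h, dif_pos]
      rw [ih]
      simp; ring
  | case2 fuel f2 h =>
      rw [buildFuel, restFuel]
      simp [h]

theorem totalFuel_eq_add_rest (f : Int) : totalFuel f = f + restFuel (fuelRequired f) := by
  induction f using totalFuel.induct with
  | case1 f h ih =>
      rw [totalFuel, restFuel]
      simp only [h, dif_pos]
      rw [ih]
  | case2 f h =>
      rw [totalFuel, restFuel]
      simp only [h, dif_neg]
      simp

theorem foldl_add_map (g : Int → Int) (l : List Int) : ∀ a : Int,
    l.foldl (fun acc m => acc + g m) a = a + (l.map g).sum := by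
  induction l with
  | nil => simp
  | cons x xs ih => intro a; simp [List.foldl, ih]; ring

-- ===== VERDICT (by name: the statement is the Claim_ definition above) =====
theorem solve_spec : Claim_equal_solve := by
  intro inp _ _
  unfold Spec_solve solve solve_alt
  simp only [sum_buildFuel, foldl_add_map]
  congr 1
  congr 1
  rw [zero_add]
  apply congrArg
  apply List.map_congr_left
  intro m _
  rw [totalFuel_eq_add_rest]
  simp [List.sum_cons]
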